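-- pv_equiv track=rewrite | github.com/underwater2/my_algorithm | Programmers/Level 2/구명보트/s1.py | solution
-- ===== SOURCE A (Python) =====
-- from collections import deque
--
-- def solution(people, limit):
--     people.sort()
--     que = deque(people)
--     answer = 0
--     while que:
--         now = que.popleft()
--         while que and que[-1] > limit-now:
--             que.pop()
--             answer += 1
--         if que:
--             que.pop()
--         answer += 1
--     return answer
-- ===== SOURCE B (Python) =====
-- def solution(people, limit):
--     people.sort()
--     i, j = 0, len(people) - 1
--     answer = 0
--     while i <= j:
--         if people[i] + people[j] <= limit:
--             i += 1
--         j -= 1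
--         answer += 1
--     return answer
-- ===== Notes on version B (the rewrite author's own statement) =====
-- stated objective: idiomatic
-- what changed: Replaced the deque with its outer loop and nested tail-popping inner loop by two index cursors and a single flat loop over the sorted list.
import Mathlib
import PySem

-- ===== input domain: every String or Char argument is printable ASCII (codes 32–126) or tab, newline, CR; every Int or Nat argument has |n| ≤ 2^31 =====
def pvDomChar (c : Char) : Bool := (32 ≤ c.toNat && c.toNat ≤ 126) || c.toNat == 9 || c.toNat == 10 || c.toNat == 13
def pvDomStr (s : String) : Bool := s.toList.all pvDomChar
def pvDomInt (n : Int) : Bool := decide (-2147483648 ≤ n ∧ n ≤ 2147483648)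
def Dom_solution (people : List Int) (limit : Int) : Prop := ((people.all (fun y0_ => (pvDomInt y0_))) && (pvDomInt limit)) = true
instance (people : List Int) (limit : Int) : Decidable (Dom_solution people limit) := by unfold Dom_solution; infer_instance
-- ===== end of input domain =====

-- B replaces A's deque (outer loop + nested tail-popping inner loop) by two index
-- cursors and one flat loop; both sort `people` in place (same mutation), the
-- theorems are about the return value.

-- ===== PORT A =====
-- the inner `while que and que[-1] > limit-now:` loop; deque modelled as a list
-- (popleft = head, que[-1] = getLast?, pop = dropLast — exact for a deque of ints)
def popTailA (limit now : Int) (que : List Int) (answer : Int) : List Int × Int :=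
  match h : que.getLast? with
  | some x =>
    if x > limit - now then popTailA limit now que.dropLast (answer + 1)
    else (que, answer)
  | none => (que, answer)
termination_by que.length
decreasing_by
  have hne : que ≠ [] := by intro e; subst e; simp at h
  have : 0 < que.length := List.length_pos_of_ne_nil hne
  simp [List.length_dropLast]; omega

theorem popTailA_length_le (limit now : Int) :
    ∀ (que : List Int) (answer : Int), (popTailA limit now que answer).1.length ≤ que.length := by
  intro que answer
  fun_induction popTailA limit now que answer with
  | case1 que answer x h hc ih => simp [List.length_dropLast] at ih ⊢; omega
  | case2 => simp
  | case3 => simp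

-- the outer `while que:` loop of A
def outerA (limit : Int) (que : List Int) (answer : Int) : Int :=
  match que with
  | [] => answer
  | now :: rest =>
    let p := popTailA limit now rest answer
    let q2 := if p.1 ≠ [] then p.1.dropLast else p.1
    outerA limit q2 (p.2 + 1)
termination_by que.length
decreasing_by
  have h1 := popTailA_length_le limit now rest answer
  have h2 : (popTailA limit now rest answer).1.dropLast.length
      ≤ (popTailA limit now rest answer).1.length := by
    simp [List.length_dropLast]
  split <;> simp_all <;> omega

def solution (people : List Int) (limit : Int) : Int :=
  outerA limit (PySem.List.sorted people (fun x => x) false) 0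

-- ===== PORT B =====
-- the `while i <= j:` loop of B; people[i]/people[j] are always in range here
-- (0 ≤ i ≤ j < len when entered from solution_alt), so getD is exact
def loopB (s : List Int) (limit : Int) (i j answer : Int) : Int :=
  if i ≤ j then
    if s.getD i.toNat 0 + s.getD j.toNat 0 ≤ limit then
      loopB s limit (i + 1) (j - 1) (answer + 1)
    else
      loopB s limit i (j - 1) (answer + 1)
  else answer
termination_by (j + 1 - i).toNat
decreasing_by all_goals omega

def solution_alt (people : List Int) (limit : Int) : Int :=
  let s := PySem.List.sorted people (fun x => x) false
  loopB s limit 0 ((s.length : Int) - 1) 0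

-- ===== PRECONDITION & SPEC =====
def Spec_solution (people : List Int) (limit : Int) (out : Int) : Prop := out = solution_alt people limit
instance (people : List Int) (limit : Int) (out : Int) : Decidable (Spec_solution people limit out) := by unfold Spec_solution; infer_instance

-- ===== CLAIM (what is proved, stated in full; the proofs are below) =====
def Claim_equal_solution : Prop := ∀ (people : List Int) (limit : Int), Dom_solution people limit → Spec_solution people limit (solution people limit)

-- ===== LEMMAS AND PROOFS =====

-- proof-only middle man: B's loop phrased over the list segment it still looks at
def loopBL (limit : Int) (l : List Int) (answer : Int) : Int :=
  match l with
  | [] => answer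
  | x :: rest =>
    match h : rest.getLast? with
    | none => answer + 1
    | some y =>
      if x + y ≤ limit then loopBL limit rest.dropLast (answer + 1)
      else loopBL limit (x :: rest.dropLast) (answer + 1)
termination_by l.length
decreasing_by
  all_goals
    (have hne : rest ≠ [] := by intro e; subst e; simp at h
     have : 0 < rest.length := List.length_pos_of_ne_nil hne
     simp only [List.length_dropLast, List.length_cons]
     omega)

-- unfolding equations stated cleanly (the h-binding match needs a split)
theorem loopBL_cons (limit x y : Int) (rest : List Int) (h : rest.getLast? = some y)
    (answer : Int) :
    loopBL limit (x :: rest) answer =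
      if x + y ≤ limit then loopBL limit rest.dropLast (answer + 1)
      else loopBL limit (x :: rest.dropLast) (answer + 1) := by
  rw [loopBL]
  split
  · next hn => rw [h] at hn; simp at hn
  · next y' hy' =>
    rw [h] at hy'
    injection hy' with hyy
    rw [hyy]

theorem popTailA_step (limit x y : Int) (rest : List Int) (h : rest.getLast? = some y)
    (answer : Int) :
    popTailA limit x rest answer =
      if y > limit - x then popTailA limit x rest.dropLast (answer + 1)
      else (rest, answer) := by
  rw [popTailA]
  split
  · next y' hy' =>
    rw [h] at hy'
    injection hy' with hyy
    rw [hyy]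
  · next hn => rw [h] at hn; simp at hn

theorem loopBL_popTail (limit x : Int) :
    ∀ (n : Nat) (rest : List Int) (answer : Int), rest.length ≤ n →
      loopBL limit (x :: rest) answer =
        (if (popTailA limit x rest answer).1 = [] then (popTailA limit x rest answer).2 + 1
         else loopBL limit (popTailA limit x rest answer).1.dropLast
                ((popTailA limit x rest answer).2 + 1)) := by
  intro n
  induction n with
  | zero =>
    intro rest answer hn
    have hr : rest = [] := by cases rest with | nil => rfl | cons a t => simp at hn
    subst hr
    simp [loopBL, popTailA]
  | succ n ihn =>
    intro rest answer hlen
    cases hgl : rest.getLast? with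
    | none =>
      have hr : rest = [] := by cases rest with | nil => rfl | cons a t => simp at hgl
      subst hr
      simp [loopBL, popTailA]
    | some y =>
      have hne : rest ≠ [] := by intro e; subst e; simp at hgl
      have hpos : 0 < rest.length := List.length_pos_of_ne_nil hne
      by_cases hc : x + y ≤ limit
      · rw [loopBL_cons limit x y rest hgl answer, if_pos hc,
            popTailA_step limit x y rest hgl answer,
            if_neg (show ¬ y > limit - x by omega)]
        simp [hne]
      · rw [loopBL_cons limit x y rest hgl answer, if_neg hc,
            popTailA_step limit x y rest hgl answer,
            if_pos (show y > limit - x by omega)]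
        exact ihn rest.dropLast (answer + 1) (by rw [List.length_dropLast]; omega)

theorem outerA_cons (limit now : Int) (rest : List Int) (answer : Int) :
    outerA limit (now :: rest) answer =
      outerA limit
        (if (popTailA limit now rest answer).1 = [] then (popTailA limit now rest answer).1
         else (popTailA limit now rest answer).1.dropLast)
        ((popTailA limit now rest answer).2 + 1) := by
  rw [outerA]
  by_cases hq : (popTailA limit now rest answer).1 = [] <;> simp [hq]

theorem outerA_eq_loopBL (limit : Int) :
    ∀ (n : Nat) (l : List Int) (answer : Int), l.length ≤ n →
      outerA limit l answer = loopBL limit l answer := by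
  intro n
  induction n with
  | zero =>
    intro l answer hn
    have hl : l = [] := by cases l with | nil => rfl | cons a t => simp at hn
    subst hl
    rw [outerA, loopBL]
  | succ n ihn =>
    intro l answer hlen
    match l with
    | [] => rw [outerA, loopBL]
    | now :: rest =>
      simp only [List.length_cons] at hlen
      rw [outerA_cons, loopBL_popTail limit now rest.length rest answer (le_refl _)]
      have hple := popTailA_length_le limit now rest answer
      by_cases hq : (popTailA limit now rest answer).1 = []
      · rw [if_pos hq, if_pos hq, hq, outerA]
      · rw [if_neg hq, if_neg hq]
        exact ihn (popTailA limit now rest answer).1.dropLast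
          ((popTailA limit now rest answer).2 + 1)
          (by rw [List.length_dropLast]; omega)

theorem slice_cons (s : List Int) (i m : Nat) (h : i < s.length) :
    (s.drop i).take (m + 1) = s.getD i 0 :: (s.drop (i + 1)).take m := by
  rw [List.drop_eq_getElem_cons h, List.take_succ_cons, List.getD_eq_getElem s 0 h]

theorem slice_getLast (s : List Int) (a m : Nat) (hm : 0 < m) (hlen : a + m ≤ s.length) :
    ((s.drop a).take m).getLast? = some (s.getD (a + m - 1) 0) := by
  have hidx : a + m - 1 = a + (m - 1) := by omega
  rw [hidx]
  have hl : ((s.drop a).take m).length = m := by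
    simp [List.length_take, List.length_drop]; omega
  rw [List.getLast?_eq_getElem?, hl]
  rw [List.getElem?_take_of_lt (by omega), List.getElem?_drop]
  have hlt : a + (m - 1) < s.length := by omega
  rw [List.getElem?_eq_getElem hlt, List.getD_eq_getElem s 0 hlt]

theorem slice_dropLast (s : List Int) (a m : Nat) (hm : a + m ≤ s.length) :
    ((s.drop a).take m).dropLast = (s.drop a).take (m - 1) := by
  rw [List.dropLast_eq_take, List.take_take, List.length_take, List.length_drop]
  rw [Nat.min_eq_left (show m ≤ s.length - a by omega)]
  rw [Nat.min_eq_left (show m - 1 ≤ m by omega)]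

theorem loopBL_single (limit z answer : Int) : loopBL limit [z] answer = answer + 1 := by
  simp [loopBL]

theorem loopB_eq_loopBL (s : List Int) (limit : Int) :
    ∀ (d i k : Nat) (answer : Int), k ≤ s.length → k - i ≤ d →
      loopB s limit (i : Int) ((k : Int) - 1) answer =
        loopBL limit ((s.drop i).take (k - i)) answer := by
  intro d
  induction d with
  | zero =>
    intro i k answer hk hd
    rw [loopB, if_neg (by omega : ¬ ((i : Int) ≤ (k : Int) - 1))]
    rw [show k - i = 0 from by omega]
    simp [loopBL]
  | succ d ih =>
    intro i k answer hk hd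
    by_cases hik : i < k
    · rw [loopB, if_pos (by omega : (i : Int) ≤ (k : Int) - 1)]
      rw [show ((i : Int)).toNat = i from by omega,
          show ((k : Int) - 1).toNat = k - 1 from by omega]
      have hcons : (s.drop i).take (k - i)
          = s.getD i 0 :: (s.drop (i + 1)).take (k - i - 1) := by
        conv_lhs => rw [show k - i = (k - i - 1) + 1 from by omega]
        rw [slice_cons s i _ (by omega)]
      by_cases hone : k = i + 1
      · -- exactly one element left: answer + 1 on both sides
        subst hone
        rw [show i + 1 - 1 = i from rfl, hcons,
            show i + 1 - i - 1 = 0 from by omega, List.take_zero, loopBL_single]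
        by_cases hc : s.getD i 0 + s.getD i 0 ≤ limit
        · rw [if_pos hc, loopB, if_neg (by omega)]
        · rw [if_neg hc, loopB, if_neg (by omega)]
      · -- at least two elements left
        have h2 : i + 2 ≤ k := by omega
        have hgl : ((s.drop (i + 1)).take (k - i - 1)).getLast?
            = some (s.getD (k - 1) 0) := by
          rw [slice_getLast s (i + 1) (k - i - 1) (by omega) (by omega)]
          rw [show i + 1 + (k - i - 1) - 1 = k - 1 from by omega]
        have hdl : ((s.drop (i + 1)).take (k - i - 1)).dropLast
            = (s.drop (i + 1)).take (k - i - 2) := by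
          rw [slice_dropLast s (i + 1) (k - i - 1) (by omega),
              show k - i - 1 - 1 = k - i - 2 from by omega]
        rw [hcons, loopBL_cons limit (s.getD i 0) (s.getD (k - 1) 0) _ hgl answer, hdl]
        by_cases hc : s.getD i 0 + s.getD (k - 1) 0 ≤ limit
        · rw [if_pos hc, if_pos hc]
          have hIH := ih (i + 1) (k - 1) (answer + 1) (by omega) (by omega)
          rw [show ((k - 1 : Nat) : Int) - 1 = (k : Int) - 1 - 1 from by omega,
              show ((i + 1 : Nat) : Int) = (i : Int) + 1 from by omega,
              show k - 1 - (i + 1) = k - i - 2 from by omega] at hIH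
          exact hIH
        · rw [if_neg hc, if_neg hc]
          have hIH := ih i (k - 1) (answer + 1) (by omega) (by omega)
          rw [show ((k - 1 : Nat) : Int) - 1 = (k : Int) - 1 - 1 from by omega] at hIH
          conv_rhs at hIH =>
            rw [show k - 1 - i = (k - i - 2) + 1 from by omega,
                slice_cons s i _ (by omega)]
          exact hIH
    · rw [loopB, if_neg (by omega : ¬ ((i : Int) ≤ (k : Int) - 1))]
      rw [show k - i = 0 from by omega]
      simp [loopBL]

-- ===== VERDICT (by name: the statement is the Claim_ definition above) =====
theorem solution_spec : Claim_equal_solution := by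
  intro people limit _
  unfold Spec_solution solution solution_alt
  rw [outerA_eq_loopBL limit (PySem.List.sorted people (fun x => x) false).length
        (PySem.List.sorted people (fun x => x) false) 0 (le_refl _)]
  have h := loopB_eq_loopBL (PySem.List.sorted people (fun x => x) false) limit
      (PySem.List.sorted people (fun x => x) false).length 0
      (PySem.List.sorted people (fun x => x) false).length 0 (le_refl _) (by omega)
  simp only [Nat.cast_zero, Nat.sub_zero, List.drop_zero, List.take_length] at h
  exact h.symm
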